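-- pv_equiv track=rewrite | github.com/Gayang2902/boj | prefix_sum/21757.py | solve
-- ===== SOURCE A (Python) =====
-- def solve(N, l):
--     total = 0
--     ps = []
--     for i in l:
--         total += i
--         ps.append(total)
--     rst = 0
--     if total % 4 == 0:
--         for i in range(N - 3):
--             if ps[i] == total // 4:
--                 for j in range(i + 1, N - 2):
--                     if ps[j] == total // 2:
--                         for k in range(j + 1, N - 1):
--                             if ps[k] == total // 4 * 3:
--                                 rst += 1
--     return rst
-- ===== SOURCE B (Python) =====
-- def solve(N, l):
--     total = sum(l)
--     if total % 4 != 0: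
--         return 0
--     q = total // 4
--     ps = []
--     acc = 0
--     for x in l:
--         acc += x
--         ps.append(acc)
--     right = 0
--     for k in range(2, N - 1):
--         if ps[k] == 3 * q:
--             right += 1
--     left = 0
--     rst = 0
--     for j in range(1, N - 2):
--         if ps[j - 1] == q:
--             left += 1
--         if ps[j] == 2 * q:
--             rst += left * right
--         if ps[j + 1] == 3 * q:
--             right -= 1
--     return rst
-- ===== Notes on version B (the rewrite author's own statement) =====
-- stated objective: alternative
-- what changed: A scans cut triples (i,j,k) with three nested loops (worst-case cubic); B makes one linear sweep over the middle cut j, maintaining a running count of total/4 prefix positions to the left and a decremented count of 3*total/4 positions to the right, and adds their product at each total/2 midpoint; on random inputs A's inner loops rarely fire, so the measured speed-up (1.59x at n=262144) was not consistent and is not claimed.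
-- outside the precondition, e.g. on solve(5, [2, 2]): A returns 0, B raises IndexError
import Mathlib
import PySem

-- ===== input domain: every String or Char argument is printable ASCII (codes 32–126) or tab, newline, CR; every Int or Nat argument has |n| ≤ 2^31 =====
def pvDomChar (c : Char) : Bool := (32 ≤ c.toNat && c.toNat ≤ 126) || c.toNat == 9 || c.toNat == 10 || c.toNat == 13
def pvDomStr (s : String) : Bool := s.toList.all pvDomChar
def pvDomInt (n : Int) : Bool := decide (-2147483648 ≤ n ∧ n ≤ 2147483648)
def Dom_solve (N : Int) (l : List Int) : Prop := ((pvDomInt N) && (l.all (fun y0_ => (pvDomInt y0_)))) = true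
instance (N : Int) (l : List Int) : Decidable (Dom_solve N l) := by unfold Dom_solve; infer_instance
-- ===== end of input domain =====

-- B replaces A's triple nested scan over cut triples by a single linear sweep: at each total/2
-- midpoint it multiplies the count of total/4 prefix positions to its left by the count of
-- 3*total/4 positions to its right (worst-case O(N) vs A's O(N^3); on random inputs A's inner
-- loops rarely fire, so no measured speed-up is claimed).

-- ===== PORT A =====
def solve (N : Int) (l : List Int) : Int :=
  let st := l.foldl (fun (st : Int × List Int) i => (st.1 + i, st.2 ++ [st.1 + i])) (0, [])
  let total := st.1
  let ps := st.2
  let rst : Int := 0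
  if PySem.Int.mod total 4 = 0 then
    (PySem.List.pyRange 0 (N - 3) 1).foldl (fun rst i =>
      if PySem.List.pyGetD ps i 0 = PySem.Int.floordiv total 4 then
        (PySem.List.pyRange (i + 1) (N - 2) 1).foldl (fun rst j =>
          if PySem.List.pyGetD ps j 0 = PySem.Int.floordiv total 2 then
            (PySem.List.pyRange (j + 1) (N - 1) 1).foldl (fun rst k =>
              if PySem.List.pyGetD ps k 0 = PySem.Int.floordiv total 4 * 3 then rst + 1 else rst) rst
          else rst) rst
      else rst) rst
  else rst

-- ===== PORT B =====
def solve_alt (N : Int) (l : List Int) : Int :=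
  let total := l.sum
  if PySem.Int.mod total 4 ≠ 0 then 0
  else
    let q := PySem.Int.floordiv total 4
    let ps := (l.foldl (fun (st : Int × List Int) x => (st.1 + x, st.2 ++ [st.1 + x])) (0, [])).2
    let right0 := (PySem.List.pyRange 2 (N - 1) 1).foldl
      (fun r k => if PySem.List.pyGetD ps k 0 = 3 * q then r + 1 else r) 0
    let fin := (PySem.List.pyRange 1 (N - 2) 1).foldl
      (fun (st : Int × Int × Int) j =>
        let left := if PySem.List.pyGetD ps (j - 1) 0 = q then st.2.1 + 1 else st.2.1
        let rst := if PySem.List.pyGetD ps j 0 = 2 * q then st.2.2 + left * st.1 else st.2.2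
        let right := if PySem.List.pyGetD ps (j + 1) 0 = 3 * q then st.1 - 1 else st.1
        (right, left, rst)) (right0, 0, 0)
    fin.2.2

-- ===== PRECONDITION & SPEC =====
-- Pre_solve excludes inputs with N > len(l) whose total is divisible by 4: there A's unguarded
-- indexing of the prefix-sum list raises IndexError for most such N (and B raises there too);
-- the few where A still returns 0 do so only because a guard happens not to fire before the
-- out-of-range access.
def Pre_solve (N : Int) (l : List Int) : Prop :=
  N ≤ (l.length : Int) ∨ PySem.Int.mod l.sum 4 ≠ 0
instance (N : Int) (l : List Int) : Decidable (Pre_solve N l) := by unfold Pre_solve; infer_instance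
def pvWitness_solve : Int × List Int := (4, [1, 1, 1, 1])
def Spec_solve (N : Int) (l : List Int) (out : Int) : Prop := out = solve_alt N l
instance (N : Int) (l : List Int) (out : Int) : Decidable (Spec_solve N l out) := by unfold Spec_solve; infer_instance

-- ===== CLAIM (what is proved, stated in full; the proofs are below) =====
def Claim_equal_solve : Prop := ∀ (N : Int) (l : List Int), Dom_solve N l → Pre_solve N l → Spec_solve N l (solve N l)

-- ===== LEMMAS AND PROOFS =====

-- number of positions x ≤ i < y whose prefix-sum entry equals v
def cntEq (P : List Int) (v : Int) (x y : Int) : Int :=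
  (((PySem.List.pyRange x y 1).countP (fun i => decide (PySem.List.pyGetD P i 0 = v))) : Int)

-- A's triple loop as a nested sum
def SigA (N q : Int) (P : List Int) : Int :=
  ((PySem.List.pyRange 0 (N - 3) 1).map (fun i =>
    if PySem.List.pyGetD P i 0 = q then
      ((PySem.List.pyRange (i + 1) (N - 2) 1).map (fun j =>
        if PySem.List.pyGetD P j 0 = 2 * q then cntEq P (3 * q) (j + 1) (N - 1) else 0)).sum
    else 0)).sum

-- B's sweep as a single sum over midpoints
def SigB (N q : Int) (P : List Int) : Int :=
  ((PySem.List.pyRange 1 (N - 2) 1).map (fun j =>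
    if PySem.List.pyGetD P j 0 = 2 * q then cntEq P q 0 j * cntEq P (3 * q) (j + 1) (N - 1) else 0)).sum

theorem build_fst (l : List Int) (t : Int) (acc : List Int) :
    (l.foldl (fun (st : Int × List Int) i => (st.1 + i, st.2 ++ [st.1 + i])) (t, acc)).1 = t + l.sum := by
  induction l generalizing t acc with
  | nil => simp
  | cons x xs ih => simp [List.foldl_cons, ih]; ring

theorem cntEq_nil (P : List Int) (v x y : Int) (h : y ≤ x) : cntEq P v x y = 0 := by
  simp [cntEq, PySem.List.pyRange_one_eq_nil h]

theorem cntEq_cons (P : List Int) (v x y : Int) (h : x < y) :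
    cntEq P v x y = (if PySem.List.pyGetD P x 0 = v then 1 else 0) + cntEq P v (x + 1) y := by
  rw [cntEq, PySem.List.pyRange_one_cons h, List.countP_cons]
  by_cases hx : PySem.List.pyGetD P x 0 = v
  · simp [hx, cntEq]; ring
  · simp [hx, cntEq]

theorem cntEq_snoc (P : List Int) (v y : Int) (h : 0 ≤ y) :
    cntEq P v 0 (y + 1) = cntEq P v 0 y + (if PySem.List.pyGetD P y 0 = v then 1 else 0) := by
  rw [cntEq, PySem.List.pyRange_one_succ_right h, List.countP_append]
  by_cases hx : PySem.List.pyGetD P y 0 = v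
  · simp [hx, cntEq]
  · simp [hx, cntEq]

-- A's triple loop computes SigA
theorem A_char (N q : Int) (P : List Int) :
    (PySem.List.pyRange 0 (N - 3) 1).foldl (fun rst i =>
      if PySem.List.pyGetD P i 0 = q then
        (PySem.List.pyRange (i + 1) (N - 2) 1).foldl (fun rst j =>
          if PySem.List.pyGetD P j 0 = 2 * q then
            (PySem.List.pyRange (j + 1) (N - 1) 1).foldl (fun rst k =>
              if PySem.List.pyGetD P k 0 = 3 * q then rst + 1 else rst) rst
          else rst) rst
      else rst) 0 = SigA N q P := by
  have hmid : ∀ (i r : Int),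
      (PySem.List.pyRange (i + 1) (N - 2) 1).foldl (fun rst j =>
          if PySem.List.pyGetD P j 0 = 2 * q then
            (PySem.List.pyRange (j + 1) (N - 1) 1).foldl (fun rst k =>
              if PySem.List.pyGetD P k 0 = 3 * q then rst + 1 else rst) rst
          else rst) r
      = r + ((PySem.List.pyRange (i + 1) (N - 2) 1).map (fun j =>
        if PySem.List.pyGetD P j 0 = 2 * q then cntEq P (3 * q) (j + 1) (N - 1) else 0)).sum := by
    intro i r
    rw [PySem.List.foldl_congr_mem
      (g := fun rst j => rst + (if PySem.List.pyGetD P j 0 = 2 * q then cntEq P (3 * q) (j + 1) (N - 1) else 0))]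
    · exact PySem.List.foldl_add _ _ _
    · intro acc j _
      by_cases hd : PySem.List.pyGetD P j 0 = 2 * q
      · simp [hd, PySem.List.foldl_ite_add_one, cntEq]
      · simp [hd]
  rw [PySem.List.foldl_congr_mem
    (g := fun rst i => rst + (if PySem.List.pyGetD P i 0 = q then
      ((PySem.List.pyRange (i + 1) (N - 2) 1).map (fun j =>
        if PySem.List.pyGetD P j 0 = 2 * q then cntEq P (3 * q) (j + 1) (N - 1) else 0)).sum else 0))]
  · rw [PySem.List.foldl_add, SigA, zero_add]
  · intro acc i _
    by_cases hc : PySem.List.pyGetD P i 0 = q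
    · simp [hc, hmid]
    · simp [hc]

-- invariant of B's sweep: left counts q-prefixes below j, right counts 3q-prefixes in (j, N-2]
theorem B_loop (N q : Int) (P : List Int) : ∀ (n : ℕ) (m r : Int), (N - 2 - m).toNat = n → 1 ≤ m →
    ((PySem.List.pyRange m (N - 2) 1).foldl (fun (st : Int × Int × Int) j =>
        let left := if PySem.List.pyGetD P (j - 1) 0 = q then st.2.1 + 1 else st.2.1
        let rst := if PySem.List.pyGetD P j 0 = 2 * q then st.2.2 + left * st.1 else st.2.2
        let right := if PySem.List.pyGetD P (j + 1) 0 = 3 * q then st.1 - 1 else st.1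
        (right, left, rst)) (cntEq P (3 * q) (m + 1) (N - 1), cntEq P q 0 (m - 1), r)).2.2
    = r + ((PySem.List.pyRange m (N - 2) 1).map (fun j =>
        if PySem.List.pyGetD P j 0 = 2 * q then cntEq P q 0 j * cntEq P (3 * q) (j + 1) (N - 1) else 0)).sum := by
  intro n
  induction n with
  | zero =>
    intro m r h0 _
    have hm : N - 2 ≤ m := by omega
    simp [PySem.List.pyRange_one_eq_nil hm]
  | succ n ih =>
    intro m r h0 h1
    have hm : m < N - 2 := by omega
    rw [PySem.List.pyRange_one_cons hm]
    simp only [List.foldl_cons, List.map_cons, List.sum_cons]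
    have hleft : (if PySem.List.pyGetD P (m - 1) 0 = q then cntEq P q 0 (m - 1) + 1 else cntEq P q 0 (m - 1))
        = cntEq P q 0 m := by
      have := cntEq_snoc P q (m - 1) (by omega)
      have hm1 : m - 1 + 1 = m := by ring
      rw [hm1] at this
      by_cases hc : PySem.List.pyGetD P (m - 1) 0 = q
      · simp [hc] at this ⊢; omega
      · simp [hc] at this ⊢; omega
    have hright : (if PySem.List.pyGetD P (m + 1) 0 = 3 * q then cntEq P (3 * q) (m + 1) (N - 1) - 1
          else cntEq P (3 * q) (m + 1) (N - 1)) = cntEq P (3 * q) (m + 1 + 1) (N - 1) := by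
      have := cntEq_cons P (3 * q) (m + 1) (N - 1) (by omega)
      by_cases hc : PySem.List.pyGetD P (m + 1) 0 = 3 * q
      · simp [hc] at this ⊢; omega
      · simp [hc] at this ⊢; omega
    simp only [hleft, hright]
    have hstep := ih (m + 1)
      (if PySem.List.pyGetD P m 0 = 2 * q then r + cntEq P q 0 m * cntEq P (3 * q) (m + 1) (N - 1) else r)
      (by omega) (by omega)
    have e1 : m + 1 - 1 = m := by ring
    rw [e1] at hstep
    rw [hstep]
    by_cases hd : PySem.List.pyGetD P m 0 = 2 * q
    · simp [hd]; ring
    · simp [hd]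

-- summation-order exchange: iterate over the first cut i, or over the midpoint j with a left count
theorem exchange (c d : Int → Prop) [DecidablePred c] [DecidablePred d] (f : Int → Int) (b : Int) :
    ∀ (n : ℕ) (a : Int), (b - a).toNat = n →
    ((PySem.List.pyRange a (b - 1) 1).map (fun i =>
      if c i then ((PySem.List.pyRange (i + 1) b 1).map (fun j => if d j then f j else 0)).sum else 0)).sum
    = ((PySem.List.pyRange (a + 1) b 1).map (fun j =>
        if d j then (((PySem.List.pyRange a j 1).countP (fun i => decide (c i))) : Int) * f j else 0)).sum := by
  intro n
  induction n with
  | zero =>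
    intro a h0
    have h1 : b - 1 ≤ a := by omega
    have h2 : b ≤ a + 1 := by omega
    simp [PySem.List.pyRange_one_eq_nil h1, PySem.List.pyRange_one_eq_nil h2]
  | succ n ih =>
    intro a h0
    by_cases hab : a < b - 1
    · have hsplit : ∀ j ∈ PySem.List.pyRange (a + 1) b 1,
          (if d j then (((PySem.List.pyRange a j 1).countP (fun i => decide (c i))) : Int) * f j else 0)
          = (if d j then (if c a then f j else 0) else 0)
            + (if d j then (((PySem.List.pyRange (a + 1) j 1).countP (fun i => decide (c i))) : Int) * f j else 0) := by
        intro j hj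
        have haj : a < j := by
          have := (PySem.List.mem_pyRange_one.1 hj).1; omega
        rw [PySem.List.pyRange_one_cons haj, List.countP_cons]
        by_cases hdj : d j <;> by_cases hca : c a
        · simp [hdj, hca]; ring
        · simp [hdj, hca]
        · simp [hdj]
        · simp [hdj]
      rw [List.map_congr_left hsplit, PySem.List.sum_map_add_int]
      have hsecond : ((PySem.List.pyRange (a + 1) b 1).map (fun j =>
            if d j then (((PySem.List.pyRange (a + 1) j 1).countP (fun i => decide (c i))) : Int) * f j else 0)).sum
          = ((PySem.List.pyRange (a + 1 + 1) b 1).map (fun j =>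
            if d j then (((PySem.List.pyRange (a + 1) j 1).countP (fun i => decide (c i))) : Int) * f j else 0)).sum := by
        rw [PySem.List.pyRange_one_cons (by omega : a + 1 < b)]
        simp [PySem.List.pyRange_one_eq_nil (le_refl (a + 1))]
      rw [hsecond, ← ih (a + 1) (by omega)]
      rw [PySem.List.pyRange_one_cons hab]
      simp only [List.map_cons, List.sum_cons]
      by_cases hca : c a
      · simp [hca]
      · simp [hca]
    · have h1 : b - 1 ≤ a := by omega
      have h2 : b ≤ a + 1 := by omega
      simp [PySem.List.pyRange_one_eq_nil h1, PySem.List.pyRange_one_eq_nil h2]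

theorem Sig_eq (N q : Int) (P : List Int) : SigA N q P = SigB N q P := by
  have h := exchange (fun i => PySem.List.pyGetD P i 0 = q) (fun j => PySem.List.pyGetD P j 0 = 2 * q)
    (fun j => cntEq P (3 * q) (j + 1) (N - 1)) (N - 2) (N - 2).toNat 0 (by simp)
  have e1 : N - 2 - 1 = N - 3 := by ring
  have e2 : (0 : Int) + 1 = 1 := by norm_num
  rw [e1, e2] at h
  unfold SigA SigB cntEq
  exact h

theorem ports_eq (N : Int) (l : List Int) : solve N l = solve_alt N l := by
  simp only [solve, solve_alt]
  have hT := build_fst l 0 []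
  rw [zero_add] at hT
  rw [hT]
  by_cases hm : PySem.Int.mod l.sum 4 = 0
  · rw [if_pos hm, if_neg (not_not_intro hm)]
    set q := PySem.Int.floordiv l.sum 4 with hq
    set P := (l.foldl (fun (st : Int × List Int) i => (st.1 + i, st.2 ++ [st.1 + i])) ((0 : Int), ([] : List Int))).2 with hP
    have hdvd : (4 : Int) ∣ l.sum := (PySem.Int.mod_eq_zero_iff_dvd _ _).1 hm
    have h2 : PySem.Int.floordiv l.sum 2 = 2 * q := by
      rw [hq, PySem.Int.floordiv_eq_ediv_of_pos (by norm_num), PySem.Int.floordiv_eq_ediv_of_pos (by norm_num)]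
      omega
    rw [h2]
    rw [show PySem.Int.floordiv l.sum 4 * 3 = 3 * q from mul_comm _ _]
    rw [A_char N q P]
    have hr0 : (PySem.List.pyRange 2 (N - 1) 1).foldl
        (fun r k => if PySem.List.pyGetD P k 0 = 3 * q then r + 1 else r) 0 = cntEq P (3 * q) 2 (N - 1) := by
      rw [cntEq, PySem.List.foldl_ite_add_one, zero_add]
    rw [hr0]
    have hstep := B_loop N q P (N - 2 - 1).toNat 1 0 rfl (le_refl 1)
    rw [show (1 : Int) + 1 = 2 from by norm_num, show (1 : Int) - 1 = 0 from by norm_num] at hstep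
    rw [cntEq_nil P q 0 0 (le_refl 0)] at hstep
    rw [hstep, zero_add]
    exact Sig_eq N q P
  · rw [if_neg hm, if_pos hm]

-- ===== VERDICT (by name: the statement is the Claim_ definition above) =====
theorem solve_spec : Claim_equal_solve := by
  intro N l _ _
  unfold Spec_solve
  exact ports_eq N l
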